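-- pv_equiv track=rewrite | github.com/evonnec/coding_challenges | python/hacker_cards.py | hackerCards
-- ===== SOURCE A (Python) =====
-- def hackerCards(collection, d):
--     # Write your code here
--     # return array of integer cost of cards aka cards in asc
--     # collection = [4, 6, 12, 8] (leanne's collection)
--     # d = 14 (mike's budget)
--     # result should be 1, 2, 3, 5 = 11
--     # collect the ints not in the collection up to the sum d
--
--     remaining_budget = d
--     result = []
--     collection_set = set(collection)
--
--     for current_card in range(1, d + 1):
--         if current_card not in collection_set and current_card <= remaining_budget:
--             remaining_budget -= current_card
--             result.append(current_card)
--         elif current_card > remaining_budget: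
--             break
--
--     return result
-- ===== SOURCE B (Python) =====
-- def _cutoff(a, budget):
--     # largest t >= a-1 with a + (a+1) + ... + t <= budget
--     if budget < a:
--         return a - 1
--     lo, hi = a, a + budget  # invariant: sum(a..lo) <= budget < sum(a..hi)
--     while hi - lo > 1:
--         mid = (lo + hi) // 2
--         if (a + mid) * (mid + 1 - a) // 2 <= budget:
--             lo = mid
--         else:
--             hi = mid
--     return lo
--
--
-- def hackerCards(collection, d):
--     owned = sorted({x for x in collection if x > 0})
--     result = []
--     budget = d
--     prev = 0
--     for s in owned:
--         a, b = prev + 1, s - 1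
--         full = (a + b) * (b + 1 - a) // 2
--         if full <= budget:
--             result.extend(range(a, b + 1))
--             budget -= full
--         else:
--             t = _cutoff(a, budget)
--             result.extend(range(a, t + 1))
--             return result
--         prev = s
--     a = prev + 1
--     t = _cutoff(a, budget)
--     result.extend(range(a, t + 1))
--     return result
-- ===== Notes on version B (the rewrite author's own statement) =====
-- stated objective: alternative
-- what changed: Instead of scanning candidate integers 1,2,3,... one at a time while testing set membership and decrementing the budget, B sorts the distinct owned positives and processes each gap between them in one step with the triangular-number formula, binary-searching the cutoff inside the final affordable gap.
import Mathlib
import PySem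

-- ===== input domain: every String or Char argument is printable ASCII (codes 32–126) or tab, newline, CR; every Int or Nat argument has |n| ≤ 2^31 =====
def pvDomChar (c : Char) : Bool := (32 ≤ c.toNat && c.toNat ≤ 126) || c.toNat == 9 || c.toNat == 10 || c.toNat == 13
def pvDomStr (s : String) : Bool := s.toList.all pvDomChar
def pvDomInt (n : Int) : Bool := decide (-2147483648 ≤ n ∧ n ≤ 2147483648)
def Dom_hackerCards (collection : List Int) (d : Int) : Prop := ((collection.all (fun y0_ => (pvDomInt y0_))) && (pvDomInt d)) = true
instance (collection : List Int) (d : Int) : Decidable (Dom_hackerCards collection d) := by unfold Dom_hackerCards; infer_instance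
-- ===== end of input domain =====

-- B replaces A's card-by-card greedy scan with gap-at-a-time arithmetic over the sorted distinct
-- owned positives (triangular-number gap sums, binary search for the cutoff in the final gap);
-- objective: alternative algorithm (not measurably faster: both are dominated by the output size).

-- ===== PORT A =====
-- the for-loop over range(1, d+1) with its break, as structural recursion on the range list
def hackerCardsLoop (cset : PySem.Set Int) (cards : List Int) (remaining : Int) (result : List Int) : List Int :=
  match cards with
  | [] => result
  | c :: rest =>
    if ¬ (PySem.Set.contains cset c) = true ∧ c ≤ remaining then
      hackerCardsLoop cset rest (remaining - c) (result ++ [c])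
    else if remaining < c then
      result
    else
      hackerCardsLoop cset rest remaining result

def hackerCards (collection : List Int) (d : Int) : List Int :=
  hackerCardsLoop (PySem.Set.ofList collection) (PySem.List.pyRange 1 (d + 1) 1) d []
-- ===== PORT B =====
-- _cutoff's while-loop: binary search with invariant sum(a..lo) <= budget < sum(a..hi)
def cutoffLoop (a budget lo hi : Int) : Int :=
  if _h : hi - lo > 1 then
    let mid := PySem.Int.floordiv (lo + hi) 2
    if PySem.Int.floordiv ((a + mid) * (mid + 1 - a)) 2 ≤ budget then
      cutoffLoop a budget mid hi
    else
      cutoffLoop a budget lo mid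
  else lo
termination_by (hi - lo).toNat
decreasing_by
  · have h1 := (PySem.Int.le_floordiv_iff_mul_le (a := lo + hi) (b := 2) (q := lo + 1) (by norm_num)).mpr (by omega)
    omega
  · have h2 := (PySem.Int.floordiv_lt_iff_lt_mul (a := lo + hi) (b := 2) (q := hi) (by norm_num)).mpr (by omega)
    omega

-- _cutoff(a, budget): largest t >= a-1 with a + (a+1) + ... + t <= budget
def cutoff (a budget : Int) : Int :=
  if budget < a then a - 1
  else cutoffLoop a budget a (a + budget)
-- the for-loop over the sorted owned positives, with the early return and the tail code after the loop
def bLoop (owned : List Int) (budget prev : Int) (result : List Int) : List Int :=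
  match owned with
  | [] =>
      let a := prev + 1
      let t := cutoff a budget
      result ++ PySem.List.pyRange a (t + 1) 1
  | s :: rest =>
      let a := prev + 1
      let b := s - 1
      let full := PySem.Int.floordiv ((a + b) * (b + 1 - a)) 2
      if full ≤ budget then
        bLoop rest (budget - full) s (result ++ PySem.List.pyRange a (b + 1) 1)
      else
        let t := cutoff a budget
        result ++ PySem.List.pyRange a (t + 1) 1

def hackerCards_alt (collection : List Int) (d : Int) : List Int :=
  bLoop (PySem.List.sorted (PySem.Set.ofList (collection.filter (fun x => 0 < x))) (fun x => x) false) d 0 []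
-- ===== PRECONDITION & SPEC =====
def Spec_hackerCards (collection : List Int) (d : Int) (out : List Int) : Prop := out = hackerCards_alt collection d
instance (collection : List Int) (d : Int) (out : List Int) : Decidable (Spec_hackerCards collection d out) := by unfold Spec_hackerCards; infer_instance

-- ===== CLAIM (what is proved, stated in full; the proofs are below) =====
def Claim_equal_hackerCards : Prop := ∀ (collection : List Int) (d : Int), Dom_hackerCards collection d → Spec_hackerCards collection d (hackerCards collection d)

-- ===== LEMMAS AND PROOFS =====

def Tsum (a t : Int) : Int := PySem.Int.floordiv ((a + t) * (t + 1 - a)) 2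
lemma Tsum_two_mul (a t : Int) : 2 * Tsum a t = (a + t) * (t + 1 - a) := by
  unfold Tsum
  rcases Int.even_or_odd (a + t) with ⟨c, hc⟩ | ⟨c, hc⟩
  · have h : (a + t) * (t + 1 - a) = 2 * (c * (t + 1 - a)) := by rw [hc]; ring
    rw [h, PySem.Int.floordiv_eq_ediv_of_pos (by norm_num), Int.mul_ediv_cancel_left _ (by norm_num)]
  · have h2 : t + 1 - a = 2 * (c + 1 - a) := by omega
    have h : (a + t) * (t + 1 - a) = 2 * ((a + t) * (c + 1 - a)) := by rw [h2]; ring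
    rw [h, PySem.Int.floordiv_eq_ediv_of_pos (by norm_num), Int.mul_ediv_cancel_left _ (by norm_num)]

lemma Tsum_base (a : Int) : Tsum a (a - 1) = 0 := by
  unfold Tsum
  have h : (a + (a - 1)) * (a - 1 + 1 - a) = 0 := by ring
  rw [h]; rfl

lemma Tsum_succ (a t : Int) : Tsum a (t + 1) = Tsum a t + (t + 1) := by
  have h1 := Tsum_two_mul a (t + 1)
  have h2 := Tsum_two_mul a t
  apply mul_left_cancel₀ (show (2:Int) ≠ 0 by norm_num)
  rw [h1]; ring_nf; ring_nf at h2; omega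

lemma Tsum_left (a t : Int) : Tsum a t = a + Tsum (a + 1) t := by
  have h1 := Tsum_two_mul a t
  have h2 := Tsum_two_mul (a + 1) t
  apply mul_left_cancel₀ (show (2:Int) ≠ 0 by norm_num)
  rw [h1]; ring_nf; ring_nf at h2; omega

lemma Tsum_ge (a t : Int) (ha : 1 ≤ a) (h : a ≤ t) : t ≤ Tsum a t := by
  induction t, h using Int.le_induction with
  | base =>
      have hb := Tsum_base a
      have hs := Tsum_succ a (a - 1)
      rw [show a - 1 + 1 = a by ring] at hs
      omega
  | succ n hn ih =>
      have hs := Tsum_succ a n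
      omega

lemma Tsum_mono (a t t' : Int) (ha : 1 ≤ a) (h1 : a - 1 ≤ t) (h2 : t ≤ t') : Tsum a t ≤ Tsum a t' := by
  induction t', h2 using Int.le_induction with
  | base => exact le_refl _
  | succ n hn ih =>
      have hs := Tsum_succ a n
      omega

-- the cutoff t is characterised by: the run a..t is affordable, a..t+1 is not
def CutSpec (a budget t : Int) : Prop := a - 1 ≤ t ∧ Tsum a t ≤ budget ∧ budget < Tsum a (t + 1)

lemma cutoffLoop_spec (a budget : Int) (_ha : 1 ≤ a) : ∀ lo hi : Int, a - 1 ≤ lo → lo < hi →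
    Tsum a lo ≤ budget → budget < Tsum a hi → CutSpec a budget (cutoffLoop a budget lo hi) := by
  intro lo hi
  induction hn : (hi - lo).toNat using Nat.strong_induction_on generalizing lo hi with
  | _ n ih =>
    intro hlo hlt hTlo hThi
    rw [cutoffLoop]
    by_cases hgap : hi - lo > 1
    · rw [dif_pos hgap]
      have hmid1 := (PySem.Int.le_floordiv_iff_mul_le (a := lo + hi) (b := 2) (q := lo + 1) (by norm_num)).mpr (by omega)
      have hmid2 := (PySem.Int.floordiv_lt_iff_lt_mul (a := lo + hi) (b := 2) (q := hi) (by norm_num)).mpr (by omega)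
      set mid := PySem.Int.floordiv (lo + hi) 2 with hmid
      have hT : PySem.Int.floordiv ((a + mid) * (mid + 1 - a)) 2 = Tsum a mid := rfl
      simp only [hT]
      by_cases hc : Tsum a mid ≤ budget
      · rw [if_pos hc]
        exact ih (hi - mid).toNat (by omega) mid hi rfl (by omega) (by omega) hc hThi
      · rw [if_neg hc]
        exact ih (mid - lo).toNat (by omega) lo mid rfl hlo (by omega) hTlo (by omega)
    · rw [dif_neg hgap]
      have : hi = lo + 1 := by omega
      subst this
      exact ⟨hlo, hTlo, hThi⟩

lemma cutoff_spec (a budget : Int) (ha : 1 ≤ a) (hab : a ≤ budget) : CutSpec a budget (cutoff a budget) := by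
  unfold cutoff
  rw [if_neg (by omega : ¬ budget < a)]
  apply cutoffLoop_spec a budget ha a (a + budget) (by omega) (by omega)
  · have hb := Tsum_base a
    have hs := Tsum_succ a (a - 1)
    rw [show a - 1 + 1 = a by ring] at hs
    omega
  · have := Tsum_ge a (a + budget) ha (by omega)
    omega

-- the greedy process both programs implement: buy k if affordable and not owned, move on to k+1
def gSpec (inColl : Int → Bool) (k budget : Int) : List Int :=
  if budget < k then []
  else if k ≤ 0 then []
  else if inColl k then gSpec inColl (k + 1) budget
  else k :: gSpec inColl (k + 1) (budget - k)
termination_by (budget + 1 - k).toNat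
decreasing_by all_goals omega

lemma g_stop (f : Int → Bool) (k budget : Int) (h : budget < k) : gSpec f k budget = [] := by
  rw [gSpec]; simp [h]

lemma g_mem (f : Int → Bool) (k budget : Int) (h1 : k ≤ budget) (h2 : 1 ≤ k) (h3 : f k = true) :
    gSpec f k budget = gSpec f (k + 1) budget := by
  rw [gSpec, if_neg (by omega : ¬ budget < k), if_neg (by omega : ¬ k ≤ 0), if_pos h3]

lemma g_buy (f : Int → Bool) (k budget : Int) (h1 : k ≤ budget) (h2 : 1 ≤ k) (h3 : f k = false) :
    gSpec f k budget = k :: gSpec f (k + 1) (budget - k) := by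
  rw [gSpec, if_neg (by omega : ¬ budget < k), if_neg (by omega : ¬ k ≤ 0), if_neg (by simp [h3] : ¬ f k = true)]

lemma g_skip (f : Int → Bool) (s budget : Int) (h2 : 1 ≤ s) (h3 : f s = true) :
    gSpec f s budget = gSpec f (s + 1) budget := by
  by_cases h : budget < s
  · rw [g_stop f s budget h, g_stop f (s + 1) budget (by omega)]
  · exact g_mem f s budget (by omega) h2 h3

lemma g_take (f : Int → Bool) : ∀ (n : Nat) (a t budget : Int), (t + 1 - a).toNat = n → 1 ≤ a → a ≤ t + 1 → Tsum a t ≤ budget →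
    (∀ k, a ≤ k → k ≤ t → f k = false) →
    gSpec f a budget = PySem.List.pyRange a (t + 1) 1 ++ gSpec f (t + 1) (budget - Tsum a t) := by
  intro n
  induction n with
  | zero =>
    intro a t budget hn ha hat hT hf
    have hta : t + 1 = a := by omega
    rw [hta, PySem.List.pyRange_one_eq_nil (by omega), List.nil_append]
    rw [show t = a - 1 by omega] at hT ⊢
    rw [Tsum_base, sub_zero]
  | succ m ih =>
    intro a t budget hn ha hat hT hf
    have hal : a ≤ t := by omega
    have hTge : a ≤ Tsum a t := by
      have h1 := Tsum_ge a t ha hal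
      omega
    have hleft := Tsum_left a t
    rw [g_buy f a budget (by omega) ha (hf a le_rfl hal)]
    rw [ih (a + 1) t (budget - a) (by omega) (by omega) (by omega) (by omega)
        (fun k hk1 hk2 => hf k (by omega) hk2)]
    rw [PySem.List.pyRange_one_cons (by omega : a < t + 1)]
    rw [List.cons_append, hleft, ← sub_sub]

-- A's loop computes gSpec
lemma aLoop_eq (cset : PySem.Set Int) (d : Int) : ∀ (n : Nat) (k rem : Int) (res : List Int),
    (d + 1 - k).toNat = n → 1 ≤ k → rem ≤ d →
    hackerCardsLoop cset (PySem.List.pyRange k (d + 1) 1) rem res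
      = res ++ gSpec (fun x => PySem.Set.contains cset x) k rem := by
  intro n
  induction n with
  | zero =>
    intro k rem res hn hk hrem
    rw [PySem.List.pyRange_one_eq_nil (by omega), hackerCardsLoop,
        g_stop _ k rem (by omega), List.append_nil]
  | succ m ih =>
    intro k rem res hn hk hrem
    rw [PySem.List.pyRange_one_cons (by omega : k < d + 1)]
    rw [hackerCardsLoop]
    by_cases hc : PySem.Set.contains cset k = true
    · rw [if_neg (fun h => h.1 hc)]
      by_cases hb : rem < k
      · rw [if_pos hb, g_stop _ k rem hb, List.append_nil]
      · rw [if_neg hb, ih (k + 1) rem res (by omega) (by omega) hrem,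
            g_mem _ k rem (by omega) hk hc]
    · have hcf : PySem.Set.contains cset k = false := Bool.eq_false_iff.mpr hc
      by_cases hb : k ≤ rem
      · rw [if_pos ⟨hc, hb⟩,
            ih (k + 1) (rem - k) (res ++ [k]) (by omega) (by omega) (by omega),
            g_buy _ k rem hb hk hcf, List.append_assoc]
        rfl
      · rw [if_neg (fun h => hb h.2), if_pos (by omega : rem < k),
            g_stop _ k rem (by omega), List.append_nil]

lemma bLoop_eq (f : Int → Bool) : ∀ (owned : List Int) (prev budget : Int) (res : List Int),
    0 ≤ prev → owned.Pairwise (· < ·) → (∀ s ∈ owned, prev < s) →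
    (∀ k, prev < k → (f k = true ↔ k ∈ owned)) →
    bLoop owned budget prev res = res ++ gSpec f (prev + 1) budget := by
  intro owned
  induction owned with
  | nil =>
    intro prev budget res hprev _ _ hmem
    have ha : (1:Int) ≤ prev + 1 := by omega
    have hff : ∀ k, prev + 1 ≤ k → f k = false := by
      intro k hk
      have := hmem k (by omega)
      simp at this
      exact this
    rw [bLoop]
    by_cases hb : budget < prev + 1
    · rw [show cutoff (prev + 1) budget = prev + 1 - 1 from if_pos hb,
          show prev + 1 - 1 + 1 = prev + 1 by ring,
          PySem.List.pyRange_one_eq_nil le_rfl, g_stop f _ _ hb, List.append_nil]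
    · obtain ⟨hp1, hp2, hp3⟩ := cutoff_spec (prev + 1) budget ha (by omega)
      set t := cutoff (prev + 1) budget with ht
      rw [g_take f ((t + 1) - (prev + 1)).toNat (prev + 1) t budget rfl ha (by omega) hp2
          (fun k hk1 _ => hff k hk1)]
      have hTs := Tsum_succ (prev + 1) t
      rw [g_stop f (t + 1) _ (by omega), List.append_nil]
  | cons s rest ih =>
    intro prev budget res hprev hpw hgt hmem
    have hps : prev < s := hgt s List.mem_cons_self
    have ha : (1:Int) ≤ prev + 1 := by omega
    have hrest_gt : ∀ x ∈ rest, s < x := by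
      intro x hx
      exact (List.pairwise_cons.mp hpw).1 x hx
    have hfs : f s = true := (hmem s hps).mpr List.mem_cons_self
    have hgap : ∀ k, prev + 1 ≤ k → k ≤ s - 1 → f k = false := by
      intro k hk1 hk2
      by_contra hne
      have hkt : f k = true := by simpa using hne
      have := (hmem k (by omega)).mp hkt
      rcases List.mem_cons.mp this with h | h
      · omega
      · have := hrest_gt k h; omega
    rw [bLoop]
    have hT : PySem.Int.floordiv ((prev + 1 + (s - 1)) * (s - 1 + 1 - (prev + 1))) 2
        = Tsum (prev + 1) (s - 1) := rfl
    simp only [hT]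
    by_cases hfull : Tsum (prev + 1) (s - 1) ≤ budget
    · rw [if_pos hfull]
      rw [ih s (budget - Tsum (prev + 1) (s - 1)) (res ++ PySem.List.pyRange (prev + 1) (s - 1 + 1) 1)
          (by omega) (List.pairwise_cons.mp hpw).2 hrest_gt
          (by
            intro k hk
            rw [hmem k (by omega)]
            simp only [List.mem_cons]
            constructor
            · rintro (h | h)
              · omega
              · exact h
            · exact fun h => Or.inr h)]
      rw [g_take f ((s - 1 + 1) - (prev + 1)).toNat (prev + 1) (s - 1) budget rfl ha (by omega) hfull hgap]
      rw [show s - 1 + 1 = s by ring, g_skip f s _ (by omega) hfs, List.append_assoc]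
    · rw [if_neg hfull]
      by_cases hb : budget < prev + 1
      · rw [show cutoff (prev + 1) budget = prev + 1 - 1 from if_pos hb,
            show prev + 1 - 1 + 1 = prev + 1 by ring,
            PySem.List.pyRange_one_eq_nil le_rfl, g_stop f _ _ hb, List.append_nil]
      · obtain ⟨hp1, hp2, hp3⟩ := cutoff_spec (prev + 1) budget ha (by omega)
        set t := cutoff (prev + 1) budget with ht
        have htb : t ≤ s - 1 := by
          by_contra hcon
          have := Tsum_mono (prev + 1) (s - 1) t ha (by omega) (by omega)
          omega
        rw [g_take f ((t + 1) - (prev + 1)).toNat (prev + 1) t budget rfl ha (by omega) hp2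
            (fun k hk1 hk2 => hgap k hk1 (by omega))]
        have hTs := Tsum_succ (prev + 1) t
        rw [g_stop f (t + 1) _ (by omega), List.append_nil]
-- ===== VERDICT (by name: the statement is the Claim_ definition above) =====
theorem hackerCards_spec : Claim_equal_hackerCards := by
  intro collection d _
  unfold Spec_hackerCards
  unfold hackerCards hackerCards_alt
  rw [aLoop_eq (PySem.Set.ofList collection) d (d + 1 - 1).toNat 1 d [] rfl le_rfl le_rfl]
  rw [bLoop_eq (fun x => PySem.Set.contains (PySem.Set.ofList collection) x) _ 0 d []
      le_rfl (PySem.List.sorted_ofList_pairwise_lt (collection.filter (fun x => 0 < x)))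
      (by
        intro s hs
        rw [PySem.List.mem_sorted] at hs
        rw [PySem.Set.mem_ofList, List.mem_filter] at hs
        have := hs.2
        simpa using this)
      (by
        intro k hk
        rw [PySem.Set.contains_iff, PySem.Set.mem_ofList, PySem.List.mem_sorted,
            PySem.Set.mem_ofList, List.mem_filter]
        constructor
        · intro h; exact ⟨h, by simpa using hk⟩
        · exact fun h => h.1)]
  rw [List.nil_append, List.nil_append, show (0:Int) + 1 = 1 by ring]
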